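-- pv_equiv track=rewrite | github.com/vaisakh25/Profiler_Agentic | file_profiler/connectors/database.py | _escape_libpq_value
-- ===== SOURCE A (Python) =====
-- def _escape_libpq_value(value: str) -> str:
--     """Escape a value for use in a libpq key=value connection string.
--
--     Per the libpq docs, values containing spaces, backslashes or
--     single-quotes must be single-quoted, with internal backslashes
--     and single-quotes escaped by preceding backslash.
--     """
--     if not value:
--         return value
--     needs_quoting = any(ch in value for ch in (" ", "'", "\\", "="))
--     if not needs_quoting:
--         return value
--     escaped = value.replace("\\", "\\\\").replace("'", "\\'")
--     return f"'{escaped}'"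
-- ===== SOURCE B (Python) =====
-- def _escape_libpq_value(value: str) -> str:
--     if not value:
--         return value
--     out = []
--     needs_quoting = False
--     for ch in value:
--         if ch == "\\":
--             out.append("\\\\")
--             needs_quoting = True
--         elif ch == "'":
--             out.append("\\'")
--             needs_quoting = True
--         else:
--             out.append(ch)
--             if ch == " " or ch == "=":
--                 needs_quoting = True
--     if needs_quoting:
--         return "'" + "".join(out) + "'"
--     return value
-- ===== Notes on version B (the rewrite author's own statement) =====
-- stated objective: alternative
-- what changed: Replaced the four-substring membership scan plus two chained str.replace passes with a single fused left-to-right pass that builds the escaped fragments and the needs-quoting flag at once; same O(n) cost, one traversal instead of six.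
import Mathlib
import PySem

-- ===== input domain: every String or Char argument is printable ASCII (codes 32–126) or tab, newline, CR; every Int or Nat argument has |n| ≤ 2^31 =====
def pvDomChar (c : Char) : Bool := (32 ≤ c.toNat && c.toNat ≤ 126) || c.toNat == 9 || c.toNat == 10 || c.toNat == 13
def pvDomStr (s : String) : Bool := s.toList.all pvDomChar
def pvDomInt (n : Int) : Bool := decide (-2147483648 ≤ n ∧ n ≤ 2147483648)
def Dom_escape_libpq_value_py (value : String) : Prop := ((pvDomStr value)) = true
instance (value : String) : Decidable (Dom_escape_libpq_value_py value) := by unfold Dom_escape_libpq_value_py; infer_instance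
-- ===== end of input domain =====

-- B replaces A's four-substring membership scan plus two chained str.replace passes by one
-- fused left-to-right pass that builds the escaped fragments and the needs-quoting flag at once.

-- ===== PORT A =====
-- f-string concatenation "'" + escaped + "'" is built through String.ofList/toList so the
-- kernel can evaluate it (Lean's String.append is opaque); the character sequence is exact.
def escape_libpq_value_py (value : String) : String :=
  if value = "" then value
  else
    let needs_quoting : Bool := [" ", "'", "\\", "="].any (fun ch => PySem.Str.isIn ch value)
    if !needs_quoting then value
    else
      let escaped := PySem.Str.replace (PySem.Str.replace value "\\" "\\\\") "'" "\\'"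
      String.ofList ('\'' :: escaped.toList ++ ['\''])

-- ===== PORT B =====
-- one loop iteration of Source B: append this character's fragment and update needs_quoting
def pvStepB (st : List (List Char) × Bool) (ch : Char) : List (List Char) × Bool :=
  if ch = '\\' then (st.1 ++ [['\\', '\\']], true)
  else if ch = '\'' then (st.1 ++ [['\\', '\'']], true)
  else (st.1 ++ [[ch]], st.2 || (ch = ' ' || ch = '='))

def escape_libpq_value_py_alt (value : String) : String :=
  if value = "" then value
  else
    let st := value.toList.foldl pvStepB ([], false)
    if st.2 then String.ofList ('\'' :: st.1.flatten ++ ['\'']) else value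

-- ===== PRECONDITION & SPEC =====
def Spec_escape_libpq_value_py (value : String) (out : String) : Prop := out = escape_libpq_value_py_alt value
instance (value : String) (out : String) : Decidable (Spec_escape_libpq_value_py value out) := by unfold Spec_escape_libpq_value_py; infer_instance

-- ===== CLAIM (what is proved, stated in full; the proofs are below) =====
def Claim_equal_escape_libpq_value_py : Prop := ∀ (value : String), Dom_escape_libpq_value_py value → Spec_escape_libpq_value_py value (escape_libpq_value_py value)

-- ===== LEMMAS AND PROOFS =====

-- the per-character fragment and the needs-quoting predicate
def pvFrag (c : Char) : List Char :=
  if c = '\\' then ['\\', '\\'] else if c = '\'' then ['\\', '\''] else [c]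

def pvNeeds (c : Char) : Bool := c = ' ' || c = '\'' || c = '\\' || c = '='

theorem pvFoldB (cs : List Char) : ∀ (fr : List (List Char)) (b : Bool),
    cs.foldl pvStepB (fr, b) = (fr ++ cs.map pvFrag, b || cs.any pvNeeds) := by
  induction cs with
  | nil => intro fr b; simp
  | cons c cs ih =>
    intro fr b
    by_cases h1 : c = '\\'
    · subst h1; simp [pvStepB, ih, pvFrag, pvNeeds]
    · by_cases h2 : c = '\''
      · subst h2; simp [pvStepB, ih, pvFrag, pvNeeds]
      · simp [List.foldl_cons, pvStepB, ih, pvFrag, pvNeeds, h1, h2,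
          Bool.or_assoc]

theorem pv_mem_iff_infix (a : Char) (l : List Char) : a ∈ l ↔ [a] <:+: l := by
  constructor
  · intro h
    obtain ⟨s, t, rfl⟩ := List.append_of_mem h
    exact ⟨s, t, by simp⟩
  · intro h
    exact List.singleton_sublist.mp h.sublist

theorem pv_needs_eq (value : String) :
    ([" ", "'", "\\", "="].any (fun ch => PySem.Str.isIn ch value))
      = value.toList.any pvNeeds := by
  rw [Bool.eq_iff_iff, List.any_eq_true, List.any_eq_true]
  constructor
  · rintro ⟨ch, hch, h⟩
    rw [PySem.Str.isIn_iff_infix] at h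
    fin_cases hch
    · exact ⟨' ', (pv_mem_iff_infix _ _).mpr h, by decide⟩
    · exact ⟨'\'', (pv_mem_iff_infix _ _).mpr h, by decide⟩
    · exact ⟨'\\', (pv_mem_iff_infix _ _).mpr h, by decide⟩
    · exact ⟨'=', (pv_mem_iff_infix _ _).mpr h, by decide⟩
  · rintro ⟨c, hc, hp⟩
    simp only [pvNeeds, Bool.or_eq_true, decide_eq_true_eq] at hp
    rcases hp with ((h | h) | h) | h <;> subst h
    · exact ⟨" ", by simp, (PySem.Str.isIn_iff_infix _ _).mpr ((pv_mem_iff_infix _ _).mp hc)⟩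
    · exact ⟨"'", by simp, (PySem.Str.isIn_iff_infix _ _).mpr ((pv_mem_iff_infix _ _).mp hc)⟩
    · exact ⟨"\\", by simp, (PySem.Str.isIn_iff_infix _ _).mpr ((pv_mem_iff_infix _ _).mp hc)⟩
    · exact ⟨"=", by simp, (PySem.Str.isIn_iff_infix _ _).mpr ((pv_mem_iff_infix _ _).mp hc)⟩

theorem pv_replace_go_single (a : Char) (new : List Char) :
    ∀ (fuel : Nat) (l acc : List Char), l.length ≤ fuel →
      PySem.Chars.replace.go [a] new fuel l acc
        = acc.reverse ++ l.flatMap (fun c => if c = a then new else [c]) := by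
  intro fuel
  induction fuel with
  | zero => intro l acc h; rw [List.length_eq_zero_iff.mp (Nat.le_zero.mp h)]; simp [PySem.Chars.replace.go]
  | succ n ih =>
    intro l acc h
    cases l with
    | nil => simp [PySem.Chars.replace.go]
    | cons c t =>
      by_cases hc : c = a
      · subst hc
        have hp : List.isPrefixOf [c] (c :: t) = true := by simp [List.isPrefixOf]
        rw [PySem.Chars.replace.go, if_pos hp]
        simp only [List.length_cons] at h
        rw [ih _ _ (by simpa using Nat.le_of_succ_le_succ h)]
        simp
      · have hp : List.isPrefixOf [a] (c :: t) = false := by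
          simp [List.isPrefixOf]; exact fun h => absurd h.symm hc
        rw [PySem.Chars.replace.go, if_neg (by simp [hp])]
        simp only [List.length_cons] at h
        rw [ih _ _ (Nat.le_of_succ_le_succ h)]
        simp [hc]

theorem pv_replace_single (a : Char) (new cs : List Char) :
    PySem.Chars.replace cs [a] new = cs.flatMap (fun c => if c = a then new else [c]) := by
  rw [PySem.Chars.replace, if_neg (by simp)]
  simpa using pv_replace_go_single a new cs.length cs [] le_rfl

theorem pv_escaped_chars (cs : List Char) :
    PySem.Chars.replace (PySem.Chars.replace cs ['\\'] ['\\', '\\']) ['\''] ['\\', '\'']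
      = (cs.map pvFrag).flatten := by
  rw [pv_replace_single, pv_replace_single, List.flatMap_assoc, ← List.flatMap_def]
  apply List.flatMap_congr
  intro c _
  by_cases h1 : c = '\\'
  · subst h1; decide
  · by_cases h2 : c = '\''
    · subst h2; decide
    · simp [pvFrag, h1, h2]

-- ===== VERDICT (by name: the statement is the Claim_ definition above) =====
theorem escape_libpq_value_py_spec : Claim_equal_escape_libpq_value_py := by
  intro value _
  unfold Spec_escape_libpq_value_py escape_libpq_value_py escape_libpq_value_py_alt
  by_cases hv : value = ""
  · simp [hv]
  · rw [if_neg hv, if_neg hv]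
    rw [pvFoldB]
    simp only [List.nil_append, Bool.false_or]
    rw [pv_needs_eq]
    cases hn : value.toList.any pvNeeds
    · simp
    · simp [pv_escaped_chars]
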